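-- pv_equiv track=rewrite | github.com/MLD3/AJS_Opioids_Use_Prediction | data_preprocessing/group_quintiles_together.py | groupRelatedFeaturesIntoLists
-- ===== SOURCE A (Python) =====
-- def groupRelatedFeaturesIntoLists(feature_names):
--     list_of_related_features = []
--
--     group_index = 0
--
--     def featurePrefix(feature_name):
--         name_end_index = feature_name.rfind('_value')
--         return feature_name[0:name_end_index]
--
--     while group_index < len(feature_names):
--         related_features = [group_index]
--
--         while group_index < len(feature_names) - 1 and featurePrefix(feature_names[group_index]) == featurePrefix(feature_names[group_index+1]):
--             group_index += 1
--             related_features.append(group_index)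
--
--         group_index += 1
--         list_of_related_features.append(related_features)
--
--     return list_of_related_features
-- ===== SOURCE B (Python) =====
-- def groupRelatedFeaturesIntoLists(feature_names):
--     # staged: prefix table -> boundary positions -> slices of index ranges
--     def featurePrefix(feature_name):
--         return feature_name[0:feature_name.rfind('_value')]
--
--     if not feature_names:
--         return []
--     n = len(feature_names)
--     prefixes = [featurePrefix(name) for name in feature_names]
--     bounds = [0] + [i for i in range(1, n) if prefixes[i] != prefixes[i - 1]] + [n]
--     return [list(range(a, b)) for a, b in zip(bounds, bounds[1:])]
-- ===== Notes on version B (the rewrite author's own statement) =====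
-- stated objective: alternative
-- what changed: Replaces A's nested while loops with manual index bookkeeping by three staged passes: build the prefix table (each prefix computed once instead of twice per comparison), collect the boundary positions where adjacent prefixes differ, then materialize each group as a range between consecutive boundaries.
import Mathlib
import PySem

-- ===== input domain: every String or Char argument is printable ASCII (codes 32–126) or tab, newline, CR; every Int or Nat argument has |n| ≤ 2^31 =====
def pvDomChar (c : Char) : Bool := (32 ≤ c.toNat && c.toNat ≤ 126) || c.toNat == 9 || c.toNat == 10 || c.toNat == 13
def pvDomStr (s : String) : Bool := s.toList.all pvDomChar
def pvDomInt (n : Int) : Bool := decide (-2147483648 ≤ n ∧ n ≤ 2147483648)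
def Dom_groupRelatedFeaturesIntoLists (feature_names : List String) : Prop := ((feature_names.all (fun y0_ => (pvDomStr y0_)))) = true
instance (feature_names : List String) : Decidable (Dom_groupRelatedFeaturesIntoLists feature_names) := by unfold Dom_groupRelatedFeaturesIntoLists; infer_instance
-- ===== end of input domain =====

-- B replaces A's nested while loops (manual group_index bookkeeping) by three staged
-- passes: prefix table, then boundary positions, then ranges between consecutive
-- boundaries (objective: alternative decomposition; same cost).

-- shared helper: both Pythons define the identical featurePrefix
-- (name[0:name.rfind('_value')]; rfind = -1 when absent, so the slice drops the last char)
def featurePrefix (s : String) : String :=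
  PySem.Str.slice s (some 0) (some (PySem.Str.rfind s "_value"))

-- ===== PORT A =====
-- inner while loop of A: advances group_index while adjacent prefixes agree
-- (fuel is only a structural totality guard; fn.length steps always suffice)
def pvInnerA (fn : List String) : Nat → Nat → List Int → Nat × List Int
  | 0, i, acc => (i, acc)
  | fuel+1, i, acc =>
      if i < fn.length - 1 ∧
          featurePrefix (fn.getD i "") = featurePrefix (fn.getD (i+1) "") then
        pvInnerA fn fuel (i+1) (acc ++ [((i : Int) + 1)])
      else (i, acc)

-- outer while loop of A (fuel guard again; each iteration advances group_index by ≥ 1)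
def pvOuterA (fn : List String) : Nat → Nat → List (List Int) → List (List Int)
  | 0, _, res => res
  | fuel+1, i, res =>
      if i < fn.length then
        let p := pvInnerA fn fn.length i [(i : Int)]
        pvOuterA fn fuel (p.1 + 1) (res ++ [p.2])
      else res

def groupRelatedFeaturesIntoLists (feature_names : List String) : List (List Int) :=
  pvOuterA feature_names feature_names.length 0 []

-- ===== PORT B =====
-- Source B: if not feature_names: return []; prefixes table; boundary positions where
-- adjacent prefixes differ; one range per pair of consecutive bounds
def groupRelatedFeaturesIntoLists_alt (feature_names : List String) : List (List Int) :=
  if feature_names = [] then []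
  else
    let prefixes := feature_names.map featurePrefix
    let bounds := [0] ++ ((List.range' 1 (feature_names.length - 1)).filter
        (fun i => prefixes.getD i "" != prefixes.getD (i-1) "")) ++ [feature_names.length]
    (bounds.zip (bounds.drop 1)).map
      (fun p => (List.range' p.1 (p.2 - p.1)).map (Nat.cast : Nat → Int))

-- ===== PRECONDITION & SPEC =====
def Spec_groupRelatedFeaturesIntoLists (feature_names : List String) (out : List (List Int)) : Prop := out = groupRelatedFeaturesIntoLists_alt feature_names
instance (feature_names : List String) (out : List (List Int)) : Decidable (Spec_groupRelatedFeaturesIntoLists feature_names out) := by unfold Spec_groupRelatedFeaturesIntoLists; infer_instance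

-- ===== CLAIM (what is proved, stated in full; the proofs are below) =====
def Claim_equal_groupRelatedFeaturesIntoLists : Prop := ∀ (feature_names : List String), Dom_groupRelatedFeaturesIntoLists feature_names → Spec_groupRelatedFeaturesIntoLists feature_names (groupRelatedFeaturesIntoLists feature_names)

-- ===== LEMMAS AND PROOFS =====

-- abbreviation for the prefix key at index j
def pvK (fn : List String) (j : Nat) : String := featurePrefix (fn.getD j "")

-- the keyed pair list for indices i, i+1, …, n-1 (the state A's inner loop walks)
def pvPairs (fn : List String) (i : Nat) : List (Int × String) :=
  (List.range' i (fn.length - i)).map (fun (j : Nat) => ((j : Int), pvK fn j))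

-- B's boundary positions strictly after index i
def pvBreaks (fn : List String) (i : Nat) : List Nat :=
  (List.range' (i+1) (fn.length - (i+1))).filter (fun j => pvK fn j != pvK fn (j-1))

-- ranges between consecutive bounds (the meaning of B's zip-map)
def pvRangesOf : List Nat → List (List Int)
  | a :: b :: rest => ((List.range' a (b - a)).map (Nat.cast : Nat → Int)) :: pvRangesOf (b :: rest)
  | _ => []

theorem pvPairs_nil (fn : List String) (i : Nat) (h : fn.length ≤ i) :
    pvPairs fn i = [] := by
  unfold pvPairs
  rw [Nat.sub_eq_zero_of_le h]
  simp

theorem pvPairs_cons (fn : List String) (i : Nat) (h : i < fn.length) :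
    pvPairs fn i = ((i : Int), pvK fn i) :: pvPairs fn (i+1) := by
  unfold pvPairs
  have hn : fn.length - i = (fn.length - (i+1)) + 1 := by omega
  rw [hn, List.range'_succ]
  simp

theorem pvPairs_length (fn : List String) (i : Nat) :
    (pvPairs fn i).length = fn.length - i := by
  unfold pvPairs
  simp

-- B's zip-map over bounds is pvRangesOf
theorem pvZip_eq_rangesOf : ∀ (bounds : List Nat),
    (bounds.zip (bounds.drop 1)).map
        (fun p => (List.range' p.1 (p.2 - p.1)).map (Nat.cast : Nat → Int))
      = pvRangesOf bounds := by
  intro bounds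
  match bounds with
  | [] => rfl
  | [a] => rfl
  | a :: b :: rest =>
    simp only [List.drop_one, List.tail_cons, List.zip_cons_cons, List.map_cons, pvRangesOf]
    congr 1
    exact pvZip_eq_rangesOf (b :: rest)

-- the takeWhile run of equal keys starting at index a: it is exactly the pairs of
-- range' a t (t its length), and the key right after the run differs from K
theorem pvTW_spec (fn : List String) (K : String) : ∀ (m a : Nat), fn.length ≤ a + m →
    ((pvPairs fn a).takeWhile (fun p => p.2 == K)
        = (List.range' a ((pvPairs fn a).takeWhile (fun p => p.2 == K)).length).map
            (fun (j : Nat) => ((j : Int), pvK fn j)))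
    ∧ (a + ((pvPairs fn a).takeWhile (fun p => p.2 == K)).length < fn.length →
        pvK fn (a + ((pvPairs fn a).takeWhile (fun p => p.2 == K)).length) ≠ K) := by
  intro m
  induction m with
  | zero =>
    intro a h
    rw [pvPairs_nil fn a (by omega)]
    exact ⟨by simp, by intro h2; omega⟩
  | succ m IH =>
    intro a h
    by_cases ha : a < fn.length
    · rw [pvPairs_cons fn a ha]
      by_cases hk : pvK fn a = K
      · simp only [List.takeWhile_cons, hk, beq_self_eq_true, if_true, List.length_cons]
        obtain ⟨IH1, IH2⟩ := IH (a+1) (by omega)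
        constructor
        · rw [List.range'_succ, List.map_cons, hk]
          · exact congrArg _ IH1
        · intro hlt
          have := IH2 (by omega)
          rw [show a + 1 + ((pvPairs fn (a+1)).takeWhile (fun p => p.2 == K)).length
              = a + (((pvPairs fn (a+1)).takeWhile (fun p => p.2 == K)).length + 1) from by omega] at this
          exact this
      · have : ((pvK fn a : String) == K) = false := by simpa using hk
        simp only [List.takeWhile_cons, this, Bool.false_eq_true, if_false, List.length_nil]
        exact ⟨by simp, fun _ => by simpa using hk⟩
    · rw [pvPairs_nil fn a (by omega)]
      exact ⟨by simp, by intro h2; omega⟩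

-- every index inside the run has key K
theorem pvRun_eq (fn : List String) (K : String) (a t : Nat)
    (heq : (pvPairs fn a).takeWhile (fun p => p.2 == K)
        = (List.range' a t).map (fun (j : Nat) => ((j : Int), pvK fn j))) :
    ∀ j, a ≤ j → j < a + t → pvK fn j = K := by
  intro j h1 h2
  have hmem : ((j : Int), pvK fn j) ∈ (List.range' a t).map
      (fun (j : Nat) => ((j : Int), pvK fn j)) :=
    List.mem_map_of_mem (by rw [List.mem_range'_1]; omega)
  rw [← heq] at hmem
  have := List.mem_takeWhile_imp hmem
  simpa using this

-- splitting B's boundary list at the end of the first run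
theorem pvBreaks_split (fn : List String) (i t : Nat) (hi : i < fn.length)
    (ht : t ≤ fn.length - (i+1))
    (heq : (pvPairs fn (i+1)).takeWhile (fun p => p.2 == pvK fn i)
        = (List.range' (i+1) t).map (fun (j : Nat) => ((j : Int), pvK fn j)))
    (hmax : i + 1 + t < fn.length → pvK fn (i + 1 + t) ≠ pvK fn i) :
    pvBreaks fn i = if i + 1 + t < fn.length then (i+1+t) :: pvBreaks fn (i+1+t) else [] := by
  have hrun := pvRun_eq fn (pvK fn i) (i+1) t heq
  unfold pvBreaks
  have hsplit : List.range' (i+1) (fn.length - (i+1))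
      = List.range' (i+1) t ++ List.range' (i+1+t) (fn.length - (i+1) - t) := by
    have h := @List.range'_append (i+1) t (fn.length - (i+1) - t) 1
    simp only [Nat.one_mul] at h
    rw [h]
    congr 1
    omega
  rw [hsplit, List.filter_append]
  have hfirst : (List.range' (i+1) t).filter (fun j => pvK fn j != pvK fn (j-1)) = [] := by
    rw [List.filter_eq_nil_iff]
    intro j hj
    rw [List.mem_range'_1] at hj
    have hj1 : pvK fn j = pvK fn i := hrun j (by omega) (by omega)
    have hj2 : pvK fn (j-1) = pvK fn i := by
      by_cases hej : j = i + 1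
      · rw [hej]; simp
      · exact hrun (j-1) (by omega) (by omega)
    simp [hj1, hj2]
  rw [hfirst, List.nil_append]
  by_cases hend : i + 1 + t < fn.length
  · rw [if_pos hend]
    have hrest : fn.length - (i+1) - t = (fn.length - (i+1+t+1)) + 1 := by omega
    rw [hrest, List.range'_succ, List.filter_cons]
    have hprev : pvK fn (i+1+t-1) = pvK fn i := by
      by_cases h0 : t = 0
      · subst h0; simp
      · exact hrun (i+1+t-1) (by omega) (by omega)
    have hne : pvK fn (i+1+t) ≠ pvK fn (i+1+t-1) := by
      rw [hprev]; exact hmax hend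
    have : (pvK fn (i+1+t) != pvK fn (i+1+t-1)) = true := by simpa using hne
    rw [if_pos this]
  · rw [if_neg hend]
    have : fn.length - (i+1) - t = 0 := by omega
    rw [this]
    simp

-- A's inner while loop (proved last time): returns the end of the run and the indices
theorem pvInner_spec (fn : List String) : ∀ (fuel i : Nat) (acc : List Int),
    i < fn.length → fn.length ≤ i + 1 + fuel →
    pvInnerA fn fuel i acc =
      (i + ((pvPairs fn (i+1)).takeWhile (fun p => p.2 == pvK fn i)).length,
       acc ++ ((pvPairs fn (i+1)).takeWhile (fun p => p.2 == pvK fn i)).map Prod.fst) := by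
  intro fuel
  induction fuel with
  | zero =>
    intro i acc hi hfuel
    rw [pvInnerA, pvPairs_nil fn (i+1) (by omega)]
    simp
  | succ f IH =>
    intro i acc hi hfuel
    rw [pvInnerA]
    by_cases h : i < fn.length - 1 ∧
        featurePrefix (fn.getD i "") = featurePrefix (fn.getD (i+1) "")
    · obtain ⟨h1, h2⟩ := h
      have hlt : i + 1 < fn.length := by omega
      have h2' : pvK fn i = pvK fn (i+1) := h2
      rw [if_pos ⟨h1, h2⟩, IH (i+1) (acc ++ [((i:Int) + 1)]) hlt (by omega)]
      rw [pvPairs_cons fn (i+1) hlt, h2']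
      simp only [List.takeWhile_cons, beq_self_eq_true, if_true, List.length_cons,
        List.map_cons, Prod.mk.injEq]
      refine ⟨by omega, ?_⟩
      push_cast
      simp
    · rw [if_neg h]
      by_cases hlast : i + 1 < fn.length
      · have h2 : pvK fn i ≠ pvK fn (i+1) := fun hc => h ⟨by omega, hc⟩
        have hpred : ((pvK fn (i+1) : String) == pvK fn i) = false := by
          simp only [beq_eq_false_iff_ne, ne_eq]
          exact fun hc => h2 hc.symm
        rw [pvPairs_cons fn (i+1) hlast]
        simp [hpred]
      · rw [pvPairs_nil fn (i+1) (by omega)]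
        simp

-- map fst of the run = the int range of its indices
theorem pvRun_map_fst (fn : List String) (K : String) (a t : Nat)
    (heq : (pvPairs fn a).takeWhile (fun p => p.2 == K)
        = (List.range' a t).map (fun (j : Nat) => ((j : Int), pvK fn j))) :
    ((pvPairs fn a).takeWhile (fun p => p.2 == K)).map Prod.fst
      = (List.range' a t).map (Nat.cast : Nat → Int) := by
  rw [heq, List.map_map]
  rfl

theorem pvOuterA_stop (fn : List String) (f i : Nat) (res : List (List Int))
    (h : fn.length ≤ i) : pvOuterA fn f i res = res := by
  cases f with
  | zero => rfl
  | succ f => rw [pvOuterA, if_neg (by omega)]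

-- A's outer loop produces exactly B's ranges between consecutive boundaries
theorem pvOuter_main (fn : List String) : ∀ (fuel i : Nat) (res : List (List Int)),
    i < fn.length → fn.length ≤ i + fuel →
    pvOuterA fn fuel i res = res ++ pvRangesOf (i :: pvBreaks fn i ++ [fn.length]) := by
  intro fuel
  induction fuel with
  | zero => intro i res hi hf; omega
  | succ fuel IH =>
    intro i res hi hf
    rw [pvOuterA, if_pos hi]
    obtain ⟨heq, hmax⟩ := pvTW_spec fn (pvK fn i) fn.length (i+1) (by omega)
    rw [pvInner_spec fn fn.length i [(i : Int)] hi (by omega)]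
    set t := ((pvPairs fn (i+1)).takeWhile (fun p => p.2 == pvK fn i)).length with htdef
    have ht : t ≤ fn.length - (i+1) := by
      rw [htdef]
      calc ((pvPairs fn (i+1)).takeWhile (fun p => p.2 == pvK fn i)).length
          ≤ (pvPairs fn (i+1)).length := (List.takeWhile_prefix _).length_le
        _ = fn.length - (i+1) := pvPairs_length fn (i+1)
    simp only [List.singleton_append]
    rw [pvRun_map_fst fn (pvK fn i) (i+1) t heq]
    have hgroup : (i : Int) :: (List.range' (i+1) t).map (Nat.cast : Nat → Int)
        = (List.range' i (t+1)).map (Nat.cast : Nat → Int) := by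
      rw [List.range'_succ, List.map_cons]
    have hsplit := pvBreaks_split fn i t hi ht heq (by rw [htdef] at hmax ⊢; exact hmax)
    by_cases hend : i + 1 + t < fn.length
    · rw [hsplit, if_pos hend]
      rw [IH (i + t + 1) (res ++ [(i : Int) :: (List.range' (i+1) t).map (Nat.cast : Nat → Int)])
        (by omega) (by omega)]
      simp only [List.cons_append, pvRangesOf]
      rw [show i + 1 + t - i = t + 1 from by omega, ← hgroup,
        show i + 1 + t = i + t + 1 from by omega]
      simp
    · have hn : i + 1 + t = fn.length := by omega
      rw [hsplit, if_neg hend]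
      rw [pvOuterA_stop fn fuel (i + t + 1) _ (by omega)]
      have hro : pvRangesOf (i :: [] ++ [fn.length])
          = [(List.range' i (fn.length - i)).map (Nat.cast : Nat → Int)] := by
        simp [pvRangesOf]
      rw [hro, show fn.length - i = t + 1 from by omega, ← hgroup]

-- the port's filter predicate (over the prefixes table) agrees with pvK on 1 ≤ j < n
theorem pvFilter_port (fn : List String) :
    (List.range' 1 (fn.length - 1)).filter
        (fun i => (fn.map featurePrefix).getD i "" != (fn.map featurePrefix).getD (i-1) "")
      = pvBreaks fn 0 := by
  unfold pvBreaks
  rw [List.filter_congr]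
  intro j hj
  rw [List.mem_range'_1] at hj
  have hjn : j < fn.length := by omega
  have h1 : (fn.map featurePrefix).getD j "" = pvK fn j := by
    unfold pvK
    rw [List.getD_eq_getElem _ _ (by simpa using hjn), List.getD_eq_getElem _ _ hjn]
    simp
  have h2 : (fn.map featurePrefix).getD (j-1) "" = pvK fn (j-1) := by
    unfold pvK
    have hlt : j - 1 < fn.length := by omega
    rw [List.getD_eq_getElem _ _ (by simpa using hlt), List.getD_eq_getElem _ _ hlt]
    simp
  rw [h1, h2]

-- ===== VERDICT (by name: the statement is the Claim_ definition above) =====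
theorem groupRelatedFeaturesIntoLists_spec : Claim_equal_groupRelatedFeaturesIntoLists := by
  intro fn _
  unfold Spec_groupRelatedFeaturesIntoLists groupRelatedFeaturesIntoLists
    groupRelatedFeaturesIntoLists_alt
  by_cases hnil : fn = []
  · subst hnil
    rfl
  · rw [if_neg hnil]
    have hpos : 0 < fn.length := List.length_pos_iff.mpr hnil
    simp only
    rw [pvFilter_port fn, pvZip_eq_rangesOf,
      pvOuter_main fn fn.length 0 [] hpos (by omega)]
    simp
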